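-- pv_equiv track=rewrite | github.com/Sathish111j/PLOS-backend | services/knowledge-base/src/app/application/deduplication.py | simhash_64
-- ===== SOURCE A (Python) =====
-- from typing import Iterable
--
-- FNV64_OFFSET_BASIS = 14695981039346656037
--
-- FNV64_PRIME = 1099511628211
--
-- UINT64_MASK = (1 << 64) - 1
--
-- def fnv1a_64(raw: bytes) -> int:
--     value = FNV64_OFFSET_BASIS
--     for byte in raw:
--         value ^= byte
--         value = (value * FNV64_PRIME) & UINT64_MASK
--     return value
--
-- def simhash_64(shingle_values: Iterable[str]) -> int:
--     vector = [0] * 64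
--     frequencies: dict[str, int] = {}
--     for shingle in shingle_values:
--         frequencies[shingle] = frequencies.get(shingle, 0) + 1
--
--     if not frequencies:
--         return 0
--
--     for shingle, weight in frequencies.items():
--         hashed = fnv1a_64(shingle.encode("utf-8"))
--         for bit_index in range(64):
--             if (hashed >> bit_index) & 1:
--                 vector[bit_index] += weight
--             else:
--                 vector[bit_index] -= weight
--
--     fingerprint = 0
--     for bit_index, score in enumerate(vector):
--         if score >= 0:
--             fingerprint |= 1 << bit_index
--     return fingerprint & UINT64_MASK
-- ===== SOURCE B (Python) =====
-- FNV64_OFFSET_BASIS = 14695981039346656037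
-- FNV64_PRIME = 1099511628211
-- UINT64_MASK = (1 << 64) - 1
--
--
-- def fnv1a_64(raw: bytes) -> int:
--     value = FNV64_OFFSET_BASIS
--     for byte in raw:
--         value ^= byte
--         value = (value * FNV64_PRIME) & UINT64_MASK
--     return value
--
--
-- def simhash_64(shingle_values):
--     # One streaming pass: per-bit count of set bits plus a total; no frequency dict.
--     positive = [0] * 64
--     total = 0
--     for shingle in shingle_values:
--         h = fnv1a_64(shingle.encode("utf-8"))
--         positive = [p + ((h >> i) & 1) for i, p in enumerate(positive)]
--         total += 1
--     if total == 0: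
--         return 0
--     fingerprint = 0
--     for i, p in enumerate(positive):
--         if 2 * p >= total:
--             fingerprint |= 1 << i
--     return fingerprint
-- ===== Notes on version B (the rewrite author's own statement) =====
-- stated objective: simpler
-- what changed: B drops A's frequency dict and signed ±weight voting: one streaming pass hashes each occurrence, keeps a per-bit count of set bits plus a total, and sets fingerprint bit i when 2*positive[i] >= total (score = 2*pos - total).
import Mathlib
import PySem

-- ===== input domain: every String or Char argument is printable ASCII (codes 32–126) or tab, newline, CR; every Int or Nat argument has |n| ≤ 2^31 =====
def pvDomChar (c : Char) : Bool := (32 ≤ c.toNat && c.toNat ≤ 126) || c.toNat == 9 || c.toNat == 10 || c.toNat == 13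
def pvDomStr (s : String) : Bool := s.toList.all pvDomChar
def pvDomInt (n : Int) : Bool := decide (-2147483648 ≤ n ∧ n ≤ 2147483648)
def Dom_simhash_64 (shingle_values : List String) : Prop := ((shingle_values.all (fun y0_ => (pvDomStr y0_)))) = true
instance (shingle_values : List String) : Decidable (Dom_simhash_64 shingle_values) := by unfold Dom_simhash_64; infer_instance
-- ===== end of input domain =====

-- B replaces A's frequency dict + signed ±weight votes by one streaming pass keeping per-bit
-- counts of set bits and a total, deciding each bit by 2*positive ≥ total (simpler decomposition).


-- ===== PORT A =====
-- shared helper fnv1a_64; 'raw' are the utf-8 bytes — on the ASCII domain these are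
-- exactly the char codes, so s.encode("utf-8") is ported as s.toList.map Char.toNat (exact on Dom)
def pvFnv1a64 (raw : List Nat) : Nat :=
  raw.foldl (fun value byte => ((value ^^^ byte) * 1099511628211) &&& (18446744073709551616 - 1))
    14695981039346656037

def pvHash (s : String) : Nat := pvFnv1a64 (s.toList.map Char.toNat)

def simhash_64 (shingle_values : List String) : Int :=
  let vector : List Int := List.replicate 64 0
  let frequencies : PySem.Dict String Int :=
    shingle_values.foldl (fun d s => d.insert s (d.getD s 0 + 1)) PySem.Dict.empty
  if frequencies.items.isEmpty then 0
  else
    let vector := frequencies.items.foldl (fun v p =>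
      let hashed := pvHash p.1
      (PySem.List.pyRange 0 64 1).foldl (fun v bi =>
        if (hashed >>> bi.toNat) &&& 1 ≠ 0 then
          PySem.List.pySetD v bi (PySem.List.pyGetD v bi 0 + p.2)
        else
          PySem.List.pySetD v bi (PySem.List.pyGetD v bi 0 - p.2)) v) vector
    let fingerprint : Nat := (PySem.List.enumerate vector).foldl (fun (fp : Nat) (q : Int × Int) =>
      if q.2 ≥ 0 then fp ||| ((1 : Nat) <<< q.1.toNat) else fp) 0
    ((fingerprint &&& (18446744073709551616 - 1) : Nat) : Int)

-- ===== PORT B =====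
def simhash_64_alt (shingle_values : List String) : Int :=
  let st := shingle_values.foldl (fun (st : List Int × Int) shingle =>
      let h := pvHash shingle
      ((PySem.List.enumerate st.1).map (fun q => q.2 + (((h >>> q.1.toNat) &&& 1 : Nat) : Int)),
        st.2 + 1))
    (List.replicate 64 0, (0 : Int))
  if st.2 = 0 then 0
  else
    let fingerprint : Nat := (PySem.List.enumerate st.1).foldl (fun (fp : Nat) (q : Int × Int) =>
      if 2 * q.2 ≥ st.2 then fp ||| ((1 : Nat) <<< q.1.toNat) else fp) 0
    (fingerprint : Int)

-- ===== PRECONDITION & SPEC =====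
def Spec_simhash_64 (shingle_values : List String) (out : Int) : Prop := out = simhash_64_alt shingle_values
instance (shingle_values : List String) (out : Int) : Decidable (Spec_simhash_64 shingle_values out) := by unfold Spec_simhash_64; infer_instance

-- ===== CLAIM (what is proved, stated in full; the proofs are below) =====
def Claim_equal_simhash_64 : Prop := ∀ (shingle_values : List String), Dom_simhash_64 shingle_values → Spec_simhash_64 shingle_values (simhash_64 shingle_values)

-- ===== LEMMAS AND PROOFS =====

-- bit j of the hash of s, as an integer 0/1
def pvBit (s : String) (j : Nat) : Int := (((pvHash s >>> j) &&& 1 : Nat) : Int)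

theorem pv_enum_map (n : Nat) (f : Nat → Int) (c : Nat → Int) :
    (PySem.List.enumerate ((List.range n).map f)).map (fun q => q.2 + c q.1.toNat)
      = (List.range n).map (fun j => f j + c j) := by
  apply List.ext_getElem
  · simp [PySem.List.length_enumerate]
  · intro i h1 h2
    simp [PySem.List.getElem_enumerate]

theorem pv_enum_range (n : Nat) (f : Nat → Int) :
    PySem.List.enumerate ((List.range n).map f)
      = (List.range n).map (fun (j : Nat) => (((j : Nat) : Int), f j)) := by
  apply List.ext_getElem
  · simp [PySem.List.length_enumerate]
  · intro i h1 h2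
    simp [PySem.List.getElem_enumerate]

theorem pv_A_inner_aux (c f : Nat → Int) : ∀ (n : Nat), n ≤ 64 →
    (PySem.List.pyRange 0 (n : Int) 1).foldl (fun v bi =>
        PySem.List.pySetD v bi (PySem.List.pyGetD v bi 0 + c bi.toNat)) ((List.range 64).map f)
      = (List.range 64).map (fun j => if j < n then f j + c j else f j) := by
  intro n
  induction n with
  | zero => intro _; simp [PySem.List.pyRange_one_eq_nil]
  | succ n ih =>
    intro hn
    have h1 : ((n + 1 : Nat) : Int) = (n : Int) + 1 := by push_cast; ring
    rw [h1, PySem.List.pyRange_one_succ_right (by positivity), List.foldl_append,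
      ih (by omega)]
    simp only [List.foldl_cons, List.foldl_nil, PySem.List.pySetD_natCast,
      PySem.List.pyGetD_natCast, Int.toNat_natCast]
    have hg : ((List.range 64).map (fun j => if j < n then f j + c j else f j)).getD n 0
        = f n := by
      rw [List.getD_eq_getElem _ _ (by simp; omega)]
      simp
    rw [hg]
    apply List.ext_getElem
    · simp
    · intro i hi1 hi2
      simp only [List.length_set, List.length_map, List.length_range] at hi1
      rw [List.getElem_set]
      by_cases hin : n = i
      · subst hin
        simp
      · simp only [if_neg hin, List.getElem_map, List.getElem_range]
        by_cases h2 : i < n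
        · rw [if_pos h2, if_pos (by omega)]
        · rw [if_neg h2, if_neg (by omega)]

theorem pv_A_inner (c f : Nat → Int) :
    (PySem.List.pyRange 0 64 1).foldl (fun v bi =>
        PySem.List.pySetD v bi (PySem.List.pyGetD v bi 0 + c bi.toNat)) ((List.range 64).map f)
      = (List.range 64).map (fun j => f j + c j) := by
  have h := pv_A_inner_aux c f 64 (le_refl 64)
  norm_num at h
  rw [h]
  apply List.map_congr_left
  intro j hj
  rw [if_pos (List.mem_range.mp hj)]

theorem pv_B_loop (xs : List String) : ∀ (f : Nat → Int) (t : Int),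
    xs.foldl (fun (st : List Int × Int) shingle =>
      ((PySem.List.enumerate st.1).map (fun q => q.2 + (((pvHash shingle >>> q.1.toNat) &&& 1 : Nat) : Int)),
        st.2 + 1)) ((List.range 64).map f, t)
    = ((List.range 64).map (fun j => f j + (xs.map (fun x => pvBit x j)).sum), t + xs.length) := by
  induction xs with
  | nil => intro f t; simp
  | cons x xs ih =>
    intro f t
    simp only [List.foldl_cons]
    have he := pv_enum_map 64 f (fun j => (((pvHash x >>> j) &&& 1 : Nat) : Int))
    rw [he, ih (fun j => f j + (((pvHash x >>> j) &&& 1 : Nat) : Int)) (t + 1)]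
    simp only [Prod.mk.injEq]
    refine ⟨?_, ?_⟩
    · apply List.map_congr_left
      intro j _
      simp [pvBit, add_assoc]
    · simp only [List.length_cons]
      push_cast
      ring

theorem pv_A_loop (l : List (String × Int)) : ∀ (f : Nat → Int),
    l.foldl (fun v p =>
      (PySem.List.pyRange 0 64 1).foldl (fun v bi =>
        if (pvHash p.1 >>> bi.toNat) &&& 1 ≠ 0 then
          PySem.List.pySetD v bi (PySem.List.pyGetD v bi 0 + p.2)
        else
          PySem.List.pySetD v bi (PySem.List.pyGetD v bi 0 - p.2)) v) ((List.range 64).map f)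
    = (List.range 64).map (fun j =>
        f j + (l.map (fun p => if pvBit p.1 j ≠ 0 then p.2 else -p.2)).sum) := by
  induction l with
  | nil => intro f; simp
  | cons p l ih =>
    intro f
    simp only [List.foldl_cons]
    have hstep : (fun (v : List Int) (bi : Int) =>
        if (pvHash p.1 >>> bi.toNat) &&& 1 ≠ 0 then
          PySem.List.pySetD v bi (PySem.List.pyGetD v bi 0 + p.2)
        else
          PySem.List.pySetD v bi (PySem.List.pyGetD v bi 0 - p.2))
        = (fun v bi => PySem.List.pySetD v bi (PySem.List.pyGetD v bi 0 +
            (if pvBit p.1 bi.toNat ≠ 0 then p.2 else -p.2))) := by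
      funext v bi
      by_cases h : (pvHash p.1 >>> bi.toNat) &&& 1 = 0
      · have hb : pvBit p.1 bi.toNat = 0 := by
          simp only [pvBit]
          exact_mod_cast h
        rw [if_neg (by simp [h]), if_neg (by simp [hb]), sub_eq_add_neg]
      · have hb : pvBit p.1 bi.toNat ≠ 0 := by
          simp only [pvBit]
          exact_mod_cast h
        rw [if_pos h, if_pos hb]
    rw [hstep, pv_A_inner (fun j => if pvBit p.1 j ≠ 0 then p.2 else -p.2) f,
      ih (fun j => f j + (if pvBit p.1 j ≠ 0 then p.2 else -p.2))]
    apply List.map_congr_left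
    intro j _
    simp [add_assoc]

theorem pv_counter_sum (xs : List String) (g : String → Int) :
    ((PySem.Set.ofList xs).map (fun k => ((xs.count k : Int)) * g k)).sum = (xs.map g).sum := by
  rw [Finset.sum_list_map_count xs g]
  rw [← List.sum_toFinset _ (PySem.Set.nodup_ofList xs)]
  have hfs : (PySem.Set.ofList xs).toFinset = xs.toFinset := by
    ext k
    simp [PySem.Set.mem_ofList]
  rw [hfs]
  apply Finset.sum_congr rfl
  intro k _
  simp

theorem pv_fp (n : Nat) (f g : Nat → Int) (P Q : Int → Prop) [DecidablePred P] [DecidablePred Q]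
    (h : ∀ j < n, (P (f j) ↔ Q (g j))) :
    (PySem.List.enumerate ((List.range n).map f)).foldl
        (fun (fp : Nat) (q : Int × Int) => if P q.2 then fp ||| ((1 : Nat) <<< q.1.toNat) else fp) 0
      = (PySem.List.enumerate ((List.range n).map g)).foldl
        (fun (fp : Nat) (q : Int × Int) => if Q q.2 then fp ||| ((1 : Nat) <<< q.1.toNat) else fp) 0 := by
  rw [pv_enum_range n f, pv_enum_range n g, List.foldl_map, List.foldl_map]
  apply PySem.List.foldl_congr_mem
  intro fp j hj
  have hjn : j < n := List.mem_range.mp hj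
  simp only [Int.toNat_natCast]
  by_cases hp : P (f j)
  · rw [if_pos hp, if_pos ((h j hjn).mp hp)]
  · rw [if_neg hp, if_neg (fun hq => hp ((h j hjn).mpr hq))]

theorem pv_fp_lt (l : List (Int × Int)) (P : Int → Prop) [DecidablePred P]
    (hl : ∀ q ∈ l, q.1.toNat < 64) : ∀ (fp : Nat), fp < 2 ^ 64 →
    l.foldl (fun (fp : Nat) (q : Int × Int) => if P q.2 then fp ||| ((1 : Nat) <<< q.1.toNat) else fp) fp < 2 ^ 64 := by
  induction l with
  | nil => intro fp h; simpa using h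
  | cons q l ih =>
    intro fp h
    simp only [List.foldl_cons]
    apply ih (fun r hr => hl r (List.mem_cons_of_mem q hr))
    by_cases hp : P q.2
    · rw [if_pos hp]
      apply Nat.or_lt_two_pow h
      rw [Nat.one_shiftLeft]
      exact Nat.pow_lt_pow_right (by norm_num) (hl q (List.mem_cons_self))
    · rwa [if_neg hp]

theorem pv_sum_aff (l : List String) (b : String → Int) :
    (l.map (fun x => 2 * b x - 1)).sum = 2 * (l.map b).sum - l.length := by
  induction l with
  | nil => simp
  | cons x l ih => simp [ih]; ring

-- ===== VERDICT (by name: the statement is the Claim_ definition above) =====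
theorem simhash_64_spec : Claim_equal_simhash_64 := by
  intro xs _
  unfold Spec_simhash_64 simhash_64 simhash_64_alt
  simp only []
  rw [PySem.Dict.foldl_insert_getD_add_one_eq_counter]
  by_cases hxs : xs = []
  · subst hxs; rfl
  · have hitems := PySem.Dict.items_counter (xs := xs)
    rw [hitems]
    have hne : ((PySem.Set.ofList xs).map (fun k => (k, (xs.count k : Int)))).isEmpty = false := by
      rcases List.exists_mem_of_ne_nil xs hxs with ⟨x, hx⟩
      have hmem : x ∈ PySem.Set.ofList xs := (PySem.Set.mem_ofList xs x).mpr hx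
      rw [List.isEmpty_eq_false_iff_exists_mem]
      exact ⟨(x, (xs.count x : Int)), List.mem_map_of_mem hmem⟩
    rw [if_neg (by simp [hne])]
    have hrep : (List.replicate 64 (0 : Int)) = (List.range 64).map (fun _ => (0 : Int)) := by
      simp
    rw [hrep, pv_B_loop xs (fun _ => 0) 0,
      pv_A_loop ((PySem.Set.ofList xs).map (fun k => (k, (xs.count k : Int)))) (fun _ => 0)]
    have hlen : (0 : Int) + xs.length ≠ 0 := by
      have : xs.length ≠ 0 := fun h => hxs (List.length_eq_zero_iff.mp h)
      omega
    rw [if_neg hlen]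
    have hkey : ∀ j : Nat,
        ((((PySem.Set.ofList xs).map (fun k => (k, (xs.count k : Int)))).map
          (fun p => if pvBit p.1 j ≠ 0 then p.2 else -p.2)).sum)
          = 2 * ((xs.map (fun x => pvBit x j)).sum) - xs.length := by
      intro j
      rw [List.map_map]
      have hcomp : ((fun p : String × Int => if pvBit p.1 j ≠ 0 then p.2 else -p.2) ∘
          (fun k => (k, (xs.count k : Int))))
          = fun k => (xs.count k : Int) * (2 * pvBit k j - 1) := by
        funext k
        simp only [Function.comp]
        have hb2 : pvHash k >>> j &&& 1 = 0 ∨ pvHash k >>> j &&& 1 = 1 := by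
          have := Nat.and_one_is_mod (pvHash k >>> j)
          omega
        rcases hb2 with h | h
        · have hb : pvBit k j = 0 := by simp [pvBit, h]
          rw [if_neg (by simp [hb]), hb]
          ring
        · have hb : pvBit k j = 1 := by simp [pvBit, h]
          rw [if_pos (by simp [hb]), hb]
          ring
      rw [hcomp, pv_counter_sum xs (fun k => 2 * pvBit k j - 1), pv_sum_aff]
    have hfp := pv_fp 64
      (fun j => 0 + (((PySem.Set.ofList xs).map (fun k => (k, (xs.count k : Int)))).map
        (fun p => if pvBit p.1 j ≠ 0 then p.2 else -p.2)).sum)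
      (fun j => 0 + (xs.map (fun x => pvBit x j)).sum)
      (fun z => z ≥ 0) (fun z => 2 * z ≥ 0 + (xs.length : Int))
      (by
        intro j _
        simp only []
        rw [hkey j]
        omega)
    simp only [] at hfp
    rw [hfp]
    have hlt := pv_fp_lt
      (PySem.List.enumerate ((List.range 64).map
        (fun j => 0 + (xs.map (fun x => pvBit x j)).sum)))
      (fun z => 2 * z ≥ 0 + (xs.length : Int))
      (by
        intro q hq
        rcases (PySem.List.mem_enumerate_iff _ _ _).mp hq with ⟨k, hk, hq'⟩
        subst hq'
        simp only [List.length_map, List.length_range] at hk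
        simp
        omega)
      0 (by norm_num)
    congr 1
    have hmask : (18446744073709551616 - 1 : Nat) = 2 ^ 64 - 1 := by norm_num
    rw [hmask, Nat.and_two_pow_sub_one_eq_mod, Nat.mod_eq_of_lt hlt]
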